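-- pv_equiv track=rewrite | github.com/YashB63/GFG-Daily-Questions | Day 723/Maximum People Visible in a Line/maximum_people_visible.py | maxPeople
-- ===== SOURCE A (Python) =====
-- def maxPeople(arr):
--     n=len(arr)
--     prev_larg=[-1]*n
--     next_larg=[n]*n
--     stack1=[]
--     stack2=[]
--     for i in range(n):
--         while stack1 and arr[stack1[-1]]<arr[i]:
--             stack1.pop()
--         prev_larg[i]=stack1[-1] if stack1 else -1
--         stack1.append(i)
--         while stack2 and arr[stack2[-1]]<arr[n-1-i]:
--             stack2.pop()
--         next_larg[n-1-i]=stack2[-1] if stack2 else n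
--         stack2.append(n-1-i)
--     ans=0
--     for i in range(n):
--         ans=max(ans,next_larg[i]-prev_larg[i]-1)
--     return ans
-- ===== SOURCE B (Python) =====
-- def maxPeople(arr):
--     n = len(arr)
--     ans = 0
--     for i in range(n):
--         l = i - 1
--         while l >= 0 and arr[l] < arr[i]:
--             l -= 1
--         r = i + 1
--         while r < n and arr[r] < arr[i]:
--             r += 1
--         ans = max(ans, r - l - 1)
--     return ans
-- ===== Notes on version B (the rewrite author's own statement) =====
-- stated objective: simpler
-- what changed: Replaces the two monotonic index stacks, the prev/next boundary arrays and the separate max pass with a single loop that, for each index, walks left and right while neighbours are strictly smaller and takes the window width directly.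
import Mathlib
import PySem

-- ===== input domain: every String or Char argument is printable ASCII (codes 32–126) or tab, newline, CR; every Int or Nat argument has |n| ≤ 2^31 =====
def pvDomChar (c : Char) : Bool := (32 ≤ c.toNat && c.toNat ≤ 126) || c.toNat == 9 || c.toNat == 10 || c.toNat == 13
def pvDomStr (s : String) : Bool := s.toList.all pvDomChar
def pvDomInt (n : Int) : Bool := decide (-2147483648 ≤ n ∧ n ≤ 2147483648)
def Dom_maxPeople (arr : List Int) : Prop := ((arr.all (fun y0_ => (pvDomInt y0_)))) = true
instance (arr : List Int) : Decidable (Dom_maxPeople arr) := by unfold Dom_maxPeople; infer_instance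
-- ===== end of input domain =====

-- B replaces A's two monotonic stacks, boundary arrays and separate max pass with one loop of
-- direct left/right strict-< walks per index (objective: simpler; not faster).

-- ===== PORT A =====
-- the two 'while stack and arr[stack[-1]] < x: stack.pop()' loops (stack head = Python stack top)
def popWhileA (arr : List Int) (x : Int) : List Nat → List Nat
  | [] => []
  | j :: rest => if arr.getD j 0 < x then popWhileA arr x rest else j :: rest

-- 'stack[-1] if stack else d'
def topOr (s : List Nat) (d : Int) : Int := match s with | [] => d | j :: _ => (j : Int)

-- one iteration of A's 'for i in range(n)' body, state = (prev_larg, next_larg, stack1, stack2)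
def stepA (arr : List Int) (s : List Int × List Int × List Nat × List Nat) (i : Nat) :
    List Int × List Int × List Nat × List Nat :=
  let n := arr.length
  let s1 := popWhileA arr (arr.getD i 0) s.2.2.1
  let prev' := s.1.set i (topOr s1 (-1))
  let m := n - 1 - i
  let s2 := popWhileA arr (arr.getD m 0) s.2.2.2
  let next' := s.2.1.set m (topOr s2 (n : Int))
  (prev', next', i :: s1, m :: s2)

def maxPeople (arr : List Int) : Int :=
  let n := arr.length
  let st := (List.range n).foldl (stepA arr)
    (List.replicate n (-1), List.replicate n (n : Int), [], [])
  (List.range n).foldl (fun ans i => max ans (st.2.1.getD i 0 - st.1.getD i 0 - 1)) 0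

-- ===== PORT B =====
-- 'l = k-1; while l >= 0 and arr[l] < x: l -= 1; return l'
def walkL (arr : List Int) (x : Int) : Nat → Int
  | 0 => -1
  | k + 1 => if arr.getD k 0 < x then walkL arr x k else (k : Int)

-- 'while r < n and arr[r] < x: r += 1; return r'
def walkR (arr : List Int) (x : Int) (r : Nat) : Int :=
  if r < arr.length then
    (if arr.getD r 0 < x then walkR arr x (r + 1) else (r : Int))
  else (arr.length : Int)
termination_by arr.length - r

def maxPeople_alt (arr : List Int) : Int :=
  (List.range arr.length).foldl
    (fun ans i => max ans (walkR arr (arr.getD i 0) (i + 1) - walkL arr (arr.getD i 0) i - 1)) 0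

-- ===== PRECONDITION & SPEC =====
def Spec_maxPeople (arr : List Int) (out : Int) : Prop := out = maxPeople_alt arr
instance (arr : List Int) (out : Int) : Decidable (Spec_maxPeople arr out) := by unfold Spec_maxPeople; infer_instance

-- ===== CLAIM (what is proved, stated in full; the proofs are below) =====
def Claim_equal_maxPeople : Prop := ∀ (arr : List Int), Dom_maxPeople arr → Spec_maxPeople arr (maxPeople arr)

-- ===== LEMMAS AND PROOFS =====

lemma walkL_spec (arr : List Int) (x : Int) (k : Nat) :
    (walkL arr x k = -1 ∧ ∀ j, j < k → arr.getD j 0 < x) ∨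
    (∃ j : Nat, j < k ∧ walkL arr x k = (j : Int) ∧ ¬ arr.getD j 0 < x ∧
      ∀ m, j < m → m < k → arr.getD m 0 < x) := by
  induction k with
  | zero => left; exact ⟨rfl, fun j h => absurd h (Nat.not_lt_zero j)⟩
  | succ k ih =>
    by_cases h : arr.getD k 0 < x
    · rcases ih with ⟨h1, h2⟩ | ⟨j, hj, he, hge, hbet⟩
      · left
        refine ⟨by rw [walkL, if_pos h]; exact h1, fun j hj => ?_⟩
        rcases Nat.lt_succ_iff_lt_or_eq.mp hj with hj | hj
        · exact h2 j hj
        · subst hj; exact h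
      · right
        refine ⟨j, Nat.lt_succ_of_lt hj, by rw [walkL, if_pos h]; exact he, hge, fun m hm1 hm2 => ?_⟩
        rcases Nat.lt_succ_iff_lt_or_eq.mp hm2 with hm | hm
        · exact hbet m hm1 hm
        · subst hm; exact h
    · right
      exact ⟨k, Nat.lt_succ_self k, by rw [walkL, if_neg h], h,
        fun m hm1 hm2 => absurd hm1 (Nat.not_lt.mpr (Nat.lt_succ_iff.mp hm2))⟩

lemma walkL_collapse (arr : List Int) (x : Int) {j k : Nat} (hjk : j ≤ k)
    (h : ∀ m, j ≤ m → m < k → arr.getD m 0 < x) : walkL arr x k = walkL arr x j := by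
  induction k with
  | zero => have : j = 0 := Nat.le_zero.mp hjk; rw [this]
  | succ k ih =>
    rcases Nat.lt_succ_iff_lt_or_eq.mp (Nat.lt_succ_of_le hjk) with hlt | he
    · have hx : arr.getD k 0 < x := h k (Nat.lt_succ_iff.mp hlt) (Nat.lt_succ_self k)
      rw [walkL, if_pos hx]
      exact ih (Nat.lt_succ_iff.mp hlt) (fun m hm1 hm2 => h m hm1 (Nat.lt_succ_of_lt hm2))
    · rw [he]

lemma walkR_spec (arr : List Int) (x : Int) (r : Nat) (hr : r ≤ arr.length) :
    (walkR arr x r = (arr.length : Int) ∧ ∀ j, r ≤ j → j < arr.length → arr.getD j 0 < x) ∨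
    (∃ j : Nat, r ≤ j ∧ j < arr.length ∧ walkR arr x r = (j : Int) ∧ ¬ arr.getD j 0 < x ∧
      ∀ m, r ≤ m → m < j → arr.getD m 0 < x) := by
  obtain ⟨d, hd⟩ : ∃ d, arr.length - r = d := ⟨_, rfl⟩
  induction d generalizing r with
  | zero =>
    have hrn : ¬ r < arr.length := by omega
    rw [walkR, if_neg hrn]
    left; exact ⟨rfl, fun j hj1 hj2 => by omega⟩
  | succ d ih =>
    have hrn : r < arr.length := by omega
    by_cases hx : arr.getD r 0 < x
    · rw [walkR, if_pos hrn, if_pos hx]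
      rcases ih (r + 1) (by omega) (by omega) with ⟨h1, h2⟩ | ⟨j, hj1, hj2, he, hge, hbet⟩
      · left
        refine ⟨h1, fun j hj1 hj2 => ?_⟩
        rcases Nat.eq_or_lt_of_le hj1 with he | hlt
        · rw [← he]; exact hx
        · exact h2 j hlt hj2
      · right
        refine ⟨j, by omega, hj2, he, hge, fun m hm1 hm2 => ?_⟩
        rcases Nat.eq_or_lt_of_le hm1 with he' | hlt
        · rw [← he']; exact hx
        · exact hbet m hlt hm2
    · rw [walkR, if_pos hrn, if_neg hx]
      right; exact ⟨r, le_rfl, hrn, rfl, hx, fun m h1 h2 => by omega⟩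

lemma walkR_collapse (arr : List Int) (x : Int) {r j : Nat} (hrj : r ≤ j) (hj : j ≤ arr.length)
    (h : ∀ m, r ≤ m → m < j → arr.getD m 0 < x) : walkR arr x r = walkR arr x j := by
  obtain ⟨d, hd⟩ : ∃ d, j - r = d := ⟨_, rfl⟩
  induction d generalizing r with
  | zero =>
    have he : r = j := by omega
    subst he
    rfl
  | succ d ih =>
    have hrj' : r < j := by omega
    have hrn : r < arr.length := by omega
    have hx := h r le_rfl hrj'
    rw [walkR, if_pos hrn, if_pos hx]
    exact ih (by omega) (fun m h1 h2 => h m (by omega) h2) (by omega)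

-- -1 ≤ walkL < k, so a nonnegative walkL is a genuine index
lemma walkL_bounds (arr : List Int) (x : Int) (k : Nat) :
    -1 ≤ walkL arr x k ∧ walkL arr x k < (k : Int) := by
  rcases walkL_spec arr x k with ⟨h, _⟩ | ⟨j, hj, he, _, _⟩
  · rw [h]; constructor <;> omega
  · rw [he]; constructor <;> omega

lemma walkR_bounds (arr : List Int) (x : Int) (r : Nat) (hr : r ≤ arr.length) :
    (r : Int) ≤ walkR arr x r ∧ walkR arr x r ≤ (arr.length : Int) := by
  rcases walkR_spec arr x r hr with ⟨h, _⟩ | ⟨j, hj1, hj2, he, _, _⟩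
  · rw [h]; constructor <;> omega
  · rw [he]; constructor <;> omega

-- the contents of stack1 after pushing index i: i on top of the chain of left boundaries
def chainL (arr : List Int) (i : Nat) : List Nat :=
  i :: (if h : 0 ≤ walkL arr (arr.getD i 0) i then
          chainL arr (walkL arr (arr.getD i 0) i).toNat
        else [])
termination_by i
decreasing_by
  have := (walkL_bounds arr (arr.getD i 0) i).2; omega

-- the contents of stack2 after pushing index m: m on top of the chain of right boundaries
def chainR (arr : List Int) (m : Nat) : List Nat :=
  m :: (if h : walkR arr (arr.getD m 0) (m + 1) < (arr.length : Int) then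
          chainR arr (walkR arr (arr.getD m 0) (m + 1)).toNat
        else [])
termination_by arr.length - m
decreasing_by
  have hb : m + 1 ≤ arr.length := by
    by_contra hc
    rw [walkR, if_neg (by omega)] at h; omega
  have := (walkR_bounds arr (arr.getD m 0) (m + 1) hb).1
  omega

lemma pop_chainL (arr : List Int) (i : Nat) :
    ∀ j, j < i → (∀ k, j < k → k < i → arr.getD k 0 < arr.getD i 0) →
    popWhileA arr (arr.getD i 0) (chainL arr j) =
      (if 0 ≤ walkL arr (arr.getD i 0) i then
        chainL arr (walkL arr (arr.getD i 0) i).toNat else []) := by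
  intro j
  induction j using Nat.strong_induction_on with
  | _ j ih =>
  intro hji hbet
  rw [chainL]
  by_cases hx : arr.getD j 0 < arr.getD i 0
  · -- arr[j] < arr[i]: j is popped
    rw [popWhileA, if_pos hx]
    by_cases hw : 0 ≤ walkL arr (arr.getD j 0) j
    · -- the stack below j is chainL of j's own left boundary; recurse
      rw [dif_pos hw]
      rcases walkL_spec arr (arr.getD j 0) j with ⟨he, _⟩ | ⟨p, hp, hpe, hpge, hpbet⟩
      · rw [he] at hw; omega
      · have htn : (walkL arr (arr.getD j 0) j).toNat = p := by rw [hpe]; simp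
        rw [htn]
        refine ih p hp (by omega) (fun k hk1 hk2 => ?_)
        by_cases hkj : k < j
        · exact lt_trans (hpbet k hk1 hkj) hx
        · by_cases hkj' : k = j
          · rw [hkj']; exact hx
          · exact hbet k (by omega) hk2
    · -- stack below j is empty: everything left of i is smaller
      rw [dif_neg hw]
      have hall : ∀ m, m < i → arr.getD m 0 < arr.getD i 0 := by
        intro m hm
        rcases walkL_spec arr (arr.getD j 0) j with ⟨_, h2⟩ | ⟨p, hp, hpe, _, _⟩
        · by_cases hmj : m < j
          · exact lt_trans (h2 m hmj) hx
          · by_cases hmj' : m = j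
            · rw [hmj']; exact hx
            · exact hbet m (by omega) hm
        · rw [hpe] at hw; omega
      have : walkL arr (arr.getD i 0) i = -1 := by
        rcases walkL_spec arr (arr.getD i 0) i with ⟨he, _⟩ | ⟨p, hp, hpe, hpge, _⟩
        · exact he
        · exact absurd (hall p hp) hpge
      rw [popWhileA, if_neg (by rw [this]; omega)]
  · -- arr[j] ≥ arr[i]: j is the left boundary of i
    rw [popWhileA, if_neg hx]
    have hcol : walkL arr (arr.getD i 0) i = walkL arr (arr.getD i 0) (j + 1) :=
      walkL_collapse arr (arr.getD i 0) (by omega) (fun m hm1 hm2 => hbet m (by omega) hm2)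
    have he : walkL arr (arr.getD i 0) i = (j : Int) := by
      rw [hcol, walkL, if_neg hx]
    rw [he, if_pos (by omega), Int.toNat_natCast]
    conv_rhs => rw [chainL]

lemma pop_chainR (arr : List Int) (m : Nat) (hm : m < arr.length) :
    ∀ j, m < j → j < arr.length → (∀ k, m < k → k < j → arr.getD k 0 < arr.getD m 0) →
    popWhileA arr (arr.getD m 0) (chainR arr j) =
      (if walkR arr (arr.getD m 0) (m + 1) < (arr.length : Int) then
        chainR arr (walkR arr (arr.getD m 0) (m + 1)).toNat else []) := by
  intro j0
  obtain ⟨d, hd0⟩ : ∃ d, arr.length - j0 = d := ⟨_, rfl⟩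
  induction d using Nat.strong_induction_on generalizing j0 with
  | _ d ih =>
  revert j0
  intro j hd hmj hjn hbet
  rw [chainR]
  by_cases hx : arr.getD j 0 < arr.getD m 0
  · rw [popWhileA, if_pos hx]
    by_cases hw : walkR arr (arr.getD j 0) (j + 1) < (arr.length : Int)
    · rw [dif_pos hw]
      rcases walkR_spec arr (arr.getD j 0) (j + 1) (by omega) with ⟨he, _⟩ | ⟨p, hp1, hp2, hpe, hpge, hpbet⟩
      · rw [he] at hw; omega
      · have htn : (walkR arr (arr.getD j 0) (j + 1)).toNat = p := by rw [hpe]; simp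
        rw [htn]
        refine ih (arr.length - p) (by omega) p rfl (by omega) hp2 (fun k hk1 hk2 => ?_)
        by_cases hkj : j + 1 ≤ k ∧ k < p
        · exact lt_trans (hpbet k hkj.1 hkj.2) hx
        · by_cases hkj' : k = j
          · rw [hkj']; exact hx
          · exact hbet k hk1 (by omega)
    · rw [dif_neg hw]
      have hall : ∀ k, m + 1 ≤ k → k < arr.length → arr.getD k 0 < arr.getD m 0 := by
        intro k hk1 hk2
        rcases walkR_spec arr (arr.getD j 0) (j + 1) (by omega) with ⟨_, h2⟩ | ⟨p, hp1, hp2, hpe, _, _⟩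
        · by_cases hkj : j + 1 ≤ k
          · exact lt_trans (h2 k hkj hk2) hx
          · by_cases hkj' : k = j
            · rw [hkj']; exact hx
            · exact hbet k (by omega) (by omega)
        · rw [hpe] at hw; omega
      have hn : walkR arr (arr.getD m 0) (m + 1) = (arr.length : Int) := by
        rcases walkR_spec arr (arr.getD m 0) (m + 1) (by omega) with ⟨he, _⟩ | ⟨p, hp1, hp2, hpe, hpge, _⟩
        · exact he
        · exact absurd (hall p hp1 hp2) hpge
      rw [popWhileA, if_neg (by rw [hn]; omega)]
  · rw [popWhileA, if_neg hx]
    have hcol : walkR arr (arr.getD m 0) (m + 1) = walkR arr (arr.getD m 0) j :=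
      walkR_collapse arr (arr.getD m 0) (by omega) (by omega) (fun k hk1 hk2 => hbet k (by omega) hk2)
    have he : walkR arr (arr.getD m 0) (m + 1) = (j : Int) := by
      rw [hcol, walkR, if_pos hjn, if_neg hx]
    rw [he, if_pos (by exact_mod_cast hjn), Int.toNat_natCast]
    conv_rhs => rw [chainR]

-- closed forms for the two boundary arrays after k iterations
def prevArr (arr : List Int) (k : Nat) : List Int :=
  (List.range arr.length).map (fun j => if j < k then walkL arr (arr.getD j 0) j else -1)

def nextArr (arr : List Int) (k : Nat) : List Int :=
  (List.range arr.length).map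
    (fun j => if arr.length - k ≤ j then walkR arr (arr.getD j 0) (j + 1) else (arr.length : Int))

def stacksInv (arr : List Int) (k : Nat) : List Nat × List Nat :=
  if k = 0 then ([], []) else (chainL arr (k - 1), chainR arr (arr.length - k))

lemma set_map_range (n : Nat) (f : Nat → Int) (i : Nat) (v : Int) :
    ((List.range n).map f).set i v = (List.range n).map (fun j => if j = i then v else f j) := by
  apply List.ext_getElem (by simp)
  intro j h1 h2
  rcases eq_or_ne j i with h | h
  · simp [h]
  · simp [h, Ne.symm h]

lemma map_range_eq_replicate (n : Nat) (f : Nat → Int) (c : Int) (h : ∀ j, j < n → f j = c) :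
    (List.range n).map f = List.replicate n c := by
  apply List.ext_getElem (by simp)
  intro i h1 h2
  simp [h i (by simpa using h1)]

lemma loop_inv (arr : List Int) (k : Nat) (hk : k ≤ arr.length) :
    (List.range k).foldl (stepA arr)
      (List.replicate arr.length (-1), List.replicate arr.length (arr.length : Int), [], []) =
    (prevArr arr k, nextArr arr k, (stacksInv arr k).1, (stacksInv arr k).2) := by
  induction k with
  | zero =>
    have hp : prevArr arr 0 = List.replicate arr.length (-1) :=
      map_range_eq_replicate _ _ _ (fun j hj => if_neg (by omega))
    have hn : nextArr arr 0 = List.replicate arr.length (arr.length : Int) :=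
      map_range_eq_replicate _ _ _ (fun j hj => if_neg (by omega))
    simp [stacksInv, hp, hn]
  | succ k ih =>
    have hk' : k < arr.length := by omega
    rw [List.range_succ, List.foldl_append, ih (by omega), List.foldl_cons, List.foldl_nil]
    simp only [stepA]
    have hpop1 : popWhileA arr (arr.getD k 0) (stacksInv arr k).1 =
        (if 0 ≤ walkL arr (arr.getD k 0) k then
          chainL arr (walkL arr (arr.getD k 0) k).toNat else []) := by
      rcases Nat.eq_zero_or_pos k with hk0 | hk1
      · subst hk0
        simp [stacksInv, popWhileA, walkL]
      · have hs : (stacksInv arr k).1 = chainL arr (k - 1) := by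
          simp [stacksInv, Nat.pos_iff_ne_zero.mp hk1]
        rw [hs]
        exact pop_chainL arr k (k - 1) (by omega) (fun k' h1 h2 => absurd h2 (by omega))
    have hw1 := walkL_bounds arr (arr.getD k 0) k
    have hval1 : topOr (if 0 ≤ walkL arr (arr.getD k 0) k then
        chainL arr (walkL arr (arr.getD k 0) k).toNat else []) (-1) =
        walkL arr (arr.getD k 0) k := by
      by_cases hw : 0 ≤ walkL arr (arr.getD k 0) k
      · rw [if_pos hw, chainL]
        simp only [topOr]
        exact Int.toNat_of_nonneg hw
      · rw [if_neg hw]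
        simp only [topOr]
        omega
    have hs1' : (k :: (if 0 ≤ walkL arr (arr.getD k 0) k then
        chainL arr (walkL arr (arr.getD k 0) k).toNat else [])) = chainL arr k := by
      conv_rhs => rw [chainL]
      simp only [dite_eq_ite]
    have hprev : (prevArr arr k).set k (walkL arr (arr.getD k 0) k) = prevArr arr (k + 1) := by
      rw [prevArr, set_map_range, prevArr]
      apply List.map_congr_left
      intro j hj
      by_cases hjk : j = k
      · subst hjk; simp
      · rw [if_neg hjk]
        by_cases hlt : j < k
        · rw [if_pos hlt, if_pos (by omega)]
        · rw [if_neg hlt, if_neg (by omega)]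
    have hm1 : arr.length - 1 - k + 1 ≤ arr.length := by omega
    have hpop2 : popWhileA arr (arr.getD (arr.length - 1 - k) 0) (stacksInv arr k).2 =
        (if walkR arr (arr.getD (arr.length - 1 - k) 0) (arr.length - 1 - k + 1) < (arr.length : Int) then
          chainR arr (walkR arr (arr.getD (arr.length - 1 - k) 0) (arr.length - 1 - k + 1)).toNat
        else []) := by
      rcases Nat.eq_zero_or_pos k with hk0 | hk1
      · subst hk0
        have hme : arr.length - 1 - 0 + 1 = arr.length := by omega
        rw [hme, walkR, if_neg (lt_irrefl _)]
        simp [stacksInv, popWhileA]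
      · have hs : (stacksInv arr k).2 = chainR arr (arr.length - k) := by
          simp [stacksInv, Nat.pos_iff_ne_zero.mp hk1]
        rw [hs]
        have := pop_chainR arr (arr.length - 1 - k) (by omega) (arr.length - k)
          (by omega) (by omega) (fun k' h1 h2 => absurd h2 (by omega))
        exact this
    have hw2 := walkR_bounds arr (arr.getD (arr.length - 1 - k) 0) (arr.length - 1 - k + 1) hm1
    have hval2 : topOr (if walkR arr (arr.getD (arr.length - 1 - k) 0) (arr.length - 1 - k + 1) < (arr.length : Int) then
        chainR arr (walkR arr (arr.getD (arr.length - 1 - k) 0) (arr.length - 1 - k + 1)).toNat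
        else []) (arr.length : Int) =
        walkR arr (arr.getD (arr.length - 1 - k) 0) (arr.length - 1 - k + 1) := by
      by_cases hw : walkR arr (arr.getD (arr.length - 1 - k) 0) (arr.length - 1 - k + 1) < (arr.length : Int)
      · rw [if_pos hw, chainR]
        simp only [topOr]
        omega
      · rw [if_neg hw]
        simp only [topOr]
        omega
    have hs2' : ((arr.length - 1 - k) ::
        (if walkR arr (arr.getD (arr.length - 1 - k) 0) (arr.length - 1 - k + 1) < (arr.length : Int) then
          chainR arr (walkR arr (arr.getD (arr.length - 1 - k) 0) (arr.length - 1 - k + 1)).toNat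
        else [])) = chainR arr (arr.length - 1 - k) := by
      conv_rhs => rw [chainR]
      simp only [dite_eq_ite]
    have hnext : (nextArr arr k).set (arr.length - 1 - k)
        (walkR arr (arr.getD (arr.length - 1 - k) 0) (arr.length - 1 - k + 1)) = nextArr arr (k + 1) := by
      rw [nextArr, set_map_range, nextArr]
      apply List.map_congr_left
      intro j hj
      have hj' : j < arr.length := List.mem_range.mp hj
      by_cases hjk : j = arr.length - 1 - k
      · subst hjk
        rw [if_pos rfl, if_pos (by omega)]
      · rw [if_neg hjk]
        by_cases hle : arr.length - k ≤ j
        · rw [if_pos hle, if_pos (by omega)]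
        · rw [if_neg hle, if_neg (by omega)]
    rw [hpop1, hpop2, hval1, hval2, hs1', hs2', hprev, hnext]
    have hsk : stacksInv arr (k + 1) = (chainL arr k, chainR arr (arr.length - 1 - k)) := by
      have he : arr.length - (k + 1) = arr.length - 1 - k := by omega
      simp [stacksInv, he]
    rw [hsk]

-- ===== VERDICT (by name: the statement is the Claim_ definition above) =====
theorem maxPeople_spec : Claim_equal_maxPeople := by
  unfold Claim_equal_maxPeople Spec_maxPeople
  intro arr _
  simp only [maxPeople, maxPeople_alt]
  rw [loop_inv arr arr.length le_rfl]
  apply PySem.List.foldl_congr_mem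
  intro acc i hi
  have hi' : i < arr.length := List.mem_range.mp hi
  simp only [prevArr, nextArr]
  rw [PySem.List.getD_map_range _ _ _ _ hi', PySem.List.getD_map_range _ _ _ _ hi']
  rw [if_pos hi', if_pos (by omega : arr.length - arr.length ≤ i)]
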